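-- pv_equiv track=rewrite | github.com/tiagoswt/product_creator | evaluations/tabbed_analytics_dashboard.py | parse_ai_reasoning_for_analytics
-- ===== SOURCE A (Python) =====
-- def parse_ai_reasoning_for_analytics(llm_reasoning: str) -> dict:
--     """
--     Parse concatenated AI reasoning into separate metric components for analytics display.
--
--     Args:
--         llm_reasoning (str): Concatenated reasoning from all metrics
--
--     Returns:
--         dict: Separated reasoning for each metric
--     """
--     if not llm_reasoning or llm_reasoning.strip() == "":
--         return {
--             "structure": "No reasoning available",
--             "content": "No reasoning available",
--             "translation": "No reasoning available",
--         }
--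
--     # Initialize with defaults
--     parsed_reasoning = {
--         "structure": "No specific reasoning provided",
--         "content": "No specific reasoning provided",
--         "translation": "No specific reasoning provided",
--     }
--
--     # Try to parse OpenEvals format: "metric_name: reasoning | metric_name: reasoning"
--     if " | " in llm_reasoning:
--         parts = llm_reasoning.split(" | ")
--         for part in parts:
--             if ":" in part:
--                 metric_part, reasoning_part = part.split(":", 1)
--                 metric_part = metric_part.strip().lower()
--                 reasoning_part = reasoning_part.strip()
--
--                 # Map different metric naming conventions
--                 if "structure" in metric_part:
--                     parsed_reasoning["structure"] = reasoning_part
--                 elif "content" in metric_part or "accuracy" in metric_part: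
--                     parsed_reasoning["content"] = reasoning_part
--                 elif "translation" in metric_part or "completeness" in metric_part:
--                     parsed_reasoning["translation"] = reasoning_part
--
--     # Try to parse fallback format or single reasoning
--     elif any(
--         keyword in llm_reasoning.lower()
--         for keyword in ["structure", "content", "translation"]
--     ):
--         # Try to find individual metric reasoning within a longer text
--         lines = llm_reasoning.split("\n")
--         current_metric = None
--         current_reasoning = []
--
--         for line in lines:
--             line = line.strip()
--             if not line:
--                 continue
--
--             # Check if line starts a new metric section
--             if line.lower().startswith("structure"):
--                 if current_metric and current_reasoning:
--                     parsed_reasoning[current_metric] = " ".join(current_reasoning)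
--                 current_metric = "structure"
--                 current_reasoning = (
--                     [line.split(":", 1)[-1].strip()] if ":" in line else [line]
--                 )
--             elif line.lower().startswith("content") or line.lower().startswith(
--                 "accuracy"
--             ):
--                 if current_metric and current_reasoning:
--                     parsed_reasoning[current_metric] = " ".join(current_reasoning)
--                 current_metric = "content"
--                 current_reasoning = (
--                     [line.split(":", 1)[-1].strip()] if ":" in line else [line]
--                 )
--             elif line.lower().startswith("translation") or line.lower().startswith(
--                 "completeness"
--             ):
--                 if current_metric and current_reasoning:
--                     parsed_reasoning[current_metric] = " ".join(current_reasoning)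
--                 current_metric = "translation"
--                 current_reasoning = (
--                     [line.split(":", 1)[-1].strip()] if ":" in line else [line]
--                 )
--             else:
--                 # Continue current reasoning
--                 if current_metric:
--                     current_reasoning.append(line)
--
--         # Don't forget the last metric
--         if current_metric and current_reasoning:
--             parsed_reasoning[current_metric] = " ".join(current_reasoning)
--
--     else:
--         # Single reasoning block - use for all metrics
--         parsed_reasoning = {
--             "structure": llm_reasoning,
--             "content": llm_reasoning,
--             "translation": llm_reasoning,
--         }
--
--     return parsed_reasoning
-- ===== SOURCE B (Python) =====
-- _DEFAULT = "No specific reasoning provided"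
-- _KEYS = ("structure", "content", "translation")
--
--
-- def _classify_part(part):
--     """Classify a ' | '-separated part by its header, or None."""
--     if ":" not in part:
--         return None
--     head = part.split(":", 1)[0].strip().lower()
--     if "structure" in head:
--         return "structure"
--     if "content" in head or "accuracy" in head:
--         return "content"
--     if "translation" in head or "completeness" in head:
--         return "translation"
--     return None
--
--
-- def _part_value(parts, k):
--     """Value for metric k: the last part classified as k (backward search)."""
--     for part in reversed(parts):
--         if _classify_part(part) == k:
--             return part.split(":", 1)[1].strip()
--     return _DEFAULT
--
--
-- def _header(line):
--     low = line.lower()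
--     if low.startswith("structure"):
--         return "structure"
--     if low.startswith("content") or low.startswith("accuracy"):
--         return "content"
--     if low.startswith("translation") or low.startswith("completeness"):
--         return "translation"
--     return None
--
--
-- def _seed(line):
--     return line.split(":", 1)[-1].strip() if ":" in line else line
--
--
-- def _blocks(lines):
--     """Recursive block parser over stripped non-empty lines:
--     drop prologue lines, then one block per header line with its following body."""
--     if not lines:
--         return []
--     k = _header(lines[0])
--     if k is None:
--         return _blocks(lines[1:])
--     n = 1
--     while n < len(lines) and _header(lines[n]) is None:
--         n += 1
--     return [(k, [_seed(lines[0])] + lines[1:n])] + _blocks(lines[n:])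
--
--
-- def _block_value(blocks, k):
--     """Value for metric k: the last block for k (backward search)."""
--     for key, texts in reversed(blocks):
--         if key == k:
--             return " ".join(texts)
--     return _DEFAULT
--
--
-- def parse_ai_reasoning_for_analytics(llm_reasoning: str) -> dict:
--     if not llm_reasoning or llm_reasoning.strip() == "":
--         return {k: "No reasoning available" for k in _KEYS}
--     if " | " in llm_reasoning:
--         parts = llm_reasoning.split(" | ")
--         return {k: _part_value(parts, k) for k in _KEYS}
--     if any(w in llm_reasoning.lower() for w in _KEYS):
--         lines = [l.strip() for l in llm_reasoning.split("\n") if l.strip()]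
--         blocks = _blocks(lines)
--         return {k: _block_value(blocks, k) for k in _KEYS}
--     return {k: llm_reasoning for k in _KEYS}
-- ===== Notes on version B (the rewrite author's own statement) =====
-- stated objective: alternative
-- what changed: B replaces A's streaming dict-mutation loops by query-style parsing: the pipe-separated branch answers each of the three metrics by a backward search for the last matching part, and the keyword branch first parses the stripped non-empty lines into blocks with a recursive header/body splitter (takeWhile-style) and then answers each metric by a backward search for its last block, so there is no mutable current_metric/current_reasoning state and no flush points.
import Mathlib
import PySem

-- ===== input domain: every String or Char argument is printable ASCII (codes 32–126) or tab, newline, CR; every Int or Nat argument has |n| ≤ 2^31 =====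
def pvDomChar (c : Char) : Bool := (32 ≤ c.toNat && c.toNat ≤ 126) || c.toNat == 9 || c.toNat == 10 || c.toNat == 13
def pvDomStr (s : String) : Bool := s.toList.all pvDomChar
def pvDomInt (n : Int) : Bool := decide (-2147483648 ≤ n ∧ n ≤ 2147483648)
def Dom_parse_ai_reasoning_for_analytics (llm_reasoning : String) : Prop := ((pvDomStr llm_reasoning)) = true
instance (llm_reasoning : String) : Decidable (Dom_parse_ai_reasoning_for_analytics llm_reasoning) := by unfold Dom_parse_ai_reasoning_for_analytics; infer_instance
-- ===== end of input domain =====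

-- B replaces A's streaming dict-mutation loops by query-style parsing: a recursive
-- header/body block splitter plus, per metric, a backward search for the last matching
-- part/block; no mutable current_metric/current_reasoning state, no flush points ("alternative").


-- ===== PORT A =====

-- line.split(":", 1)[-1].strip() if ":" in line else line   (identical expression in both Pythons)
def pvSeed (line : String) : String :=
  if PySem.Str.isIn ":" line then
    PySem.Str.strip (((PySem.Str.splitMax? line ":" 1).getD [line]).getLastD line)
  else line

-- part.split(":", 1)[0].strip().lower()  /  part.split(":", 1)[-1].strip()
-- (identical subexpressions in both Pythons)
def pvMetricPart (part : String) : String :=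
  PySem.Str.lower (PySem.Str.strip (((PySem.Str.splitMax? part ":" 1).getD [part]).getD 0 ""))
def pvReasoningPart (part : String) : String :=
  PySem.Str.strip (((PySem.Str.splitMax? part ":" 1).getD [part]).getLastD "")

-- body of A's 'for part in parts' loop (" | " branch)
def pvStepBar (d : PySem.Dict String String) (part : String) : PySem.Dict String String :=
  if PySem.Str.isIn ":" part then
    if PySem.Str.isIn "structure" (pvMetricPart part) then
      d.insert "structure" (pvReasoningPart part)
    else if PySem.Str.isIn "content" (pvMetricPart part) ||
        PySem.Str.isIn "accuracy" (pvMetricPart part) then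
      d.insert "content" (pvReasoningPart part)
    else if PySem.Str.isIn "translation" (pvMetricPart part) ||
        PySem.Str.isIn "completeness" (pvMetricPart part) then
      d.insert "translation" (pvReasoningPart part)
    else d
  else d

-- 'if current_metric and current_reasoning: parsed_reasoning[current_metric] = " ".join(current_reasoning)'
def pvFlush (d : PySem.Dict String String) (cm : Option String) (cr : List String) :
    PySem.Dict String String :=
  match cm with
  | some m => if cr = [] then d else d.insert m (PySem.Str.join " " cr)
  | none => d

-- rest of A's line-loop body after 'line = line.strip(); if not line: continue'
def pvBodyA (st : PySem.Dict String String × Option String × List String) (line : String) :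
    PySem.Dict String String × Option String × List String :=
  if PySem.Str.startswith (PySem.Str.lower line) "structure" then
    (pvFlush st.1 st.2.1 st.2.2, some "structure", [pvSeed line])
  else if PySem.Str.startswith (PySem.Str.lower line) "content" ||
      PySem.Str.startswith (PySem.Str.lower line) "accuracy" then
    (pvFlush st.1 st.2.1 st.2.2, some "content", [pvSeed line])
  else if PySem.Str.startswith (PySem.Str.lower line) "translation" ||
      PySem.Str.startswith (PySem.Str.lower line) "completeness" then
    (pvFlush st.1 st.2.1 st.2.2, some "translation", [pvSeed line])
  else
    match st.2.1 with
    | some _ => (st.1, st.2.1, st.2.2 ++ [line])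
    | none => st

-- body of A's line loop; state = (dict, current_metric, current_reasoning)
def pvStepA (st : PySem.Dict String String × Option String × List String) (line0 : String) :
    PySem.Dict String String × Option String × List String :=
  let line := PySem.Str.strip line0
  if line = "" then st else pvBodyA st line

def parse_ai_reasoning_for_analytics (llm_reasoning : String) : List (String × String) :=
  if llm_reasoning = "" ∨ PySem.Str.strip llm_reasoning = "" then
    [("structure", "No reasoning available"), ("content", "No reasoning available"),
     ("translation", "No reasoning available")]
  else
    let init : PySem.Dict String String :=
      PySem.Dict.ofList [("structure", "No specific reasoning provided"),
        ("content", "No specific reasoning provided"),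
        ("translation", "No specific reasoning provided")]
    if PySem.Str.isIn " | " llm_reasoning then
      let parts := (PySem.Str.split? llm_reasoning " | ").getD []
      (parts.foldl pvStepBar init).items
    else if (["structure", "content", "translation"]).any
        (fun k => PySem.Str.isIn k (PySem.Str.lower llm_reasoning)) then
      let lines := (PySem.Str.split? llm_reasoning "\n").getD []
      let st := lines.foldl pvStepA (init, none, [])
      (pvFlush st.1 st.2.1 st.2.2).items
    else
      [("structure", llm_reasoning), ("content", llm_reasoning),
       ("translation", llm_reasoning)]

-- ===== PORT B =====

-- helper _classify_part of Source B
def pvClassifyPart (part : String) : Option String :=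
  if ¬ PySem.Str.isIn ":" part then none
  else
    if PySem.Str.isIn "structure" (pvMetricPart part) then some "structure"
    else if PySem.Str.isIn "content" (pvMetricPart part) ||
        PySem.Str.isIn "accuracy" (pvMetricPart part) then some "content"
    else if PySem.Str.isIn "translation" (pvMetricPart part) ||
        PySem.Str.isIn "completeness" (pvMetricPart part) then some "translation"
    else none

-- helper _part_value of Source B: backward search for the last part classified as k
def pvPartValue (parts : List String) (k : String) : String :=
  match parts.reverse.find? (fun x => pvClassifyPart x == some k) with
  | some x => pvReasoningPart x
  | none => "No specific reasoning provided"

-- helper _header of Source B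
def pvHeader (line : String) : Option String :=
  if PySem.Str.startswith (PySem.Str.lower line) "structure" then some "structure"
  else if PySem.Str.startswith (PySem.Str.lower line) "content" ||
      PySem.Str.startswith (PySem.Str.lower line) "accuracy" then some "content"
  else if PySem.Str.startswith (PySem.Str.lower line) "translation" ||
      PySem.Str.startswith (PySem.Str.lower line) "completeness" then some "translation"
  else none

-- helper _blocks of Source B: drop prologue lines, then one block per header line
-- (body = following non-header lines, Source B's while loop = takeWhile/dropWhile)
def pvBlocks : List String → List (String × List String)
  | [] => []
  | l :: ls =>
    match pvHeader l with
    | none => pvBlocks ls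
    | some k =>
      (k, pvSeed l :: ls.takeWhile (fun x => (pvHeader x).isNone)) ::
        pvBlocks (ls.dropWhile (fun x => (pvHeader x).isNone))
termination_by ls => ls.length
decreasing_by
  all_goals simp only [List.length_cons]
  all_goals first
    | exact Nat.lt_succ_of_le (List.length_dropWhile_le _ _)
    | omega

-- helper _block_value of Source B: backward search for the last block for k
def pvBlockValue (blocks : List (String × List String)) (k : String) : String :=
  match blocks.reverse.find? (fun x => x.1 == k) with
  | some x => PySem.Str.join " " x.2
  | none => "No specific reasoning provided"

def parse_ai_reasoning_for_analytics_alt (llm_reasoning : String) : List (String × String) :=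
  if PySem.Str.strip llm_reasoning = "" then
    [("structure", "No reasoning available"), ("content", "No reasoning available"),
     ("translation", "No reasoning available")]
  else if PySem.Str.isIn " | " llm_reasoning then
    let parts := (PySem.Str.split? llm_reasoning " | ").getD []
    [("structure", pvPartValue parts "structure"), ("content", pvPartValue parts "content"),
     ("translation", pvPartValue parts "translation")]
  else if (["structure", "content", "translation"]).any
      (fun k => PySem.Str.isIn k (PySem.Str.lower llm_reasoning)) then
    let lines := (((PySem.Str.split? llm_reasoning "\n").getD []).map PySem.Str.strip).filter
      (fun l => l != "")
    let blocks := pvBlocks lines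
    [("structure", pvBlockValue blocks "structure"), ("content", pvBlockValue blocks "content"),
     ("translation", pvBlockValue blocks "translation")]
  else
    [("structure", llm_reasoning), ("content", llm_reasoning),
     ("translation", llm_reasoning)]

-- ===== PRECONDITION & SPEC =====
def Spec_parse_ai_reasoning_for_analytics (llm_reasoning : String) (out : List (String × String)) : Prop := out = parse_ai_reasoning_for_analytics_alt llm_reasoning
instance (llm_reasoning : String) (out : List (String × String)) : Decidable (Spec_parse_ai_reasoning_for_analytics llm_reasoning out) := by unfold Spec_parse_ai_reasoning_for_analytics; infer_instance

-- ===== CLAIM (what is proved, stated in full; the proofs are below) =====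
def Claim_equal_parse_ai_reasoning_for_analytics : Prop := ∀ (llm_reasoning : String), Dom_parse_ai_reasoning_for_analytics llm_reasoning → Spec_parse_ai_reasoning_for_analytics llm_reasoning (parse_ai_reasoning_for_analytics llm_reasoning)

-- ===== LEMMAS AND PROOFS =====

-- the three-key dict every branch manipulates
def pvMk3 (a b c : String) : PySem.Dict String String :=
  PySem.Dict.mk [("structure", a), ("content", b), ("translation", c)]

-- parsed_reasoning[key] = " ".join(texts)
def pvAssign (d : PySem.Dict String String) (seg : String × List String) :
    PySem.Dict String String :=
  d.insert seg.1 (PySem.Str.join " " seg.2)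

def pvAppendLast (segs : List (String × List String)) (line : String) :
    List (String × List String) :=
  match segs with
  | [] => []
  | [(k, ts)] => [(k, ts ++ [line])]
  | s :: rest => s :: pvAppendLast rest line

-- one step of A's loop, seen as acting on a segment list
def pvSegStep (segs : List (String × List String)) (s : String) :
    List (String × List String) :=
  match pvHeader s with
  | some k => segs ++ [(k, [pvSeed s])]
  | none => pvAppendLast segs s

-- reconstruct A's loop state from a segment list
def pvStateOf (d : PySem.Dict String String) :
    List (String × List String) → PySem.Dict String String × Option String × List String
  | [] => (d, none, [])
  | [(k, ts)] => (d, some k, ts)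
  | p :: rest => pvStateOf (pvAssign d p) rest

def pvGoodSeg (p : String × List String) : Prop :=
  (p.1 = "structure" ∨ p.1 = "content" ∨ p.1 = "translation") ∧ p.2 ≠ []

-- last value written for key k by a fold of overwrites
def pvLastV {α : Type} (cls : α → Option String) (val : α → String) (xs : List α)
    (k dflt : String) : String :=
  xs.foldl (fun acc x => if cls x == some k then val x else acc) dflt

lemma pvStateOf_append (d : PySem.Dict String String) (segs : List (String × List String))
    (k : String) (ts : List String) :
    pvStateOf d (segs ++ [(k, ts)]) = (segs.foldl pvAssign d, some k, ts) := by
  induction segs generalizing d with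
  | nil => rfl
  | cons p rest ih =>
    cases rest with
    | nil => simp only [List.cons_append, List.nil_append, pvStateOf, List.foldl]
    | cons q r => simp only [List.cons_append, pvStateOf, List.foldl]; exact ih _

lemma pvFlush_stateOf (d : PySem.Dict String String) (segs : List (String × List String))
    (hne : ∀ p ∈ segs, pvGoodSeg p) :
    pvFlush (pvStateOf d segs).1 (pvStateOf d segs).2.1 (pvStateOf d segs).2.2 =
      segs.foldl pvAssign d := by
  induction segs generalizing d with
  | nil => rfl
  | cons p rest ih =>
    cases rest with
    | nil =>
      obtain ⟨k, ts⟩ := p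
      have h := (hne (k, ts) (by simp)).2
      simp [pvStateOf, pvFlush, pvAssign, h]
    | cons q r =>
      simp only [pvStateOf, List.foldl]
      exact ih _ (fun x hx => hne x (List.mem_cons_of_mem _ hx))

lemma pvAppendLast_append (segs : List (String × List String)) (k : String)
    (ts : List String) (line : String) :
    pvAppendLast (segs ++ [(k, ts)]) line = segs ++ [(k, ts ++ [line])] := by
  induction segs with
  | nil => rfl
  | cons s rest ih =>
    cases rest with
    | nil =>
      simp only [List.cons_append, List.nil_append]
      rw [show pvAppendLast (s :: [(k, ts)]) line = s :: pvAppendLast [(k, ts)] line from rfl]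
      rfl
    | cons t r =>
      simp only [List.cons_append]
      rw [show pvAppendLast (s :: t :: (r ++ [(k, ts)])) line
            = s :: pvAppendLast (t :: (r ++ [(k, ts)])) line from rfl]
      rw [show (t :: (r ++ [(k, ts)]) : List (String × List String))
            = (t :: r) ++ [(k, ts)] from rfl, ih]
      simp

lemma pvHeader_cases (s k : String) (h : pvHeader s = some k) :
    k = "structure" ∨ k = "content" ∨ k = "translation" := by
  unfold pvHeader at h
  split_ifs at h <;> simp_all

lemma pvAppendLast_preserves (segs : List (String × List String)) (line : String)
    (hne : ∀ p ∈ segs, pvGoodSeg p) : ∀ p ∈ pvAppendLast segs line, pvGoodSeg p := by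
  rcases List.eq_nil_or_concat segs with rfl | ⟨init, ⟨k, ts⟩, rfl⟩
  · simp [pvAppendLast]
  · rw [List.concat_eq_append] at hne ⊢
    rw [pvAppendLast_append]
    intro p hp
    rcases List.mem_append.1 hp with h | h
    · exact hne p (List.mem_append.2 (Or.inl h))
    · have hk := (hne (k, ts) (List.mem_append.2 (Or.inr (by simp)))).1
      simp at h
      simp [h, pvGoodSeg, hk]

lemma pvSegStep_preserves (segs : List (String × List String)) (s : String)
    (hne : ∀ p ∈ segs, pvGoodSeg p) : ∀ p ∈ pvSegStep segs s, pvGoodSeg p := by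
  intro p hp
  unfold pvSegStep at hp
  cases hm : pvHeader s with
  | some k =>
    rw [hm] at hp
    rcases List.mem_append.1 hp with h | h
    · exact hne p h
    · simp at h
      simp [h, pvGoodSeg, pvHeader_cases s k hm]
  | none =>
    rw [hm] at hp
    exact pvAppendLast_preserves segs s hne p hp

-- A's loop body, re-expressed through the header classifier
lemma pvBodyA_eq_header (st : PySem.Dict String String × Option String × List String)
    (s : String) :
    pvBodyA st s =
      match pvHeader s with
      | some k => (pvFlush st.1 st.2.1 st.2.2, some k, [pvSeed s])
      | none =>
        match st.2.1 with
        | some _ => (st.1, st.2.1, st.2.2 ++ [s])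
        | none => st := by
  unfold pvBodyA pvHeader
  split_ifs <;> rfl

-- one step of A's loop tracks one segment step
lemma pv_step_eq (d : PySem.Dict String String) (segs : List (String × List String))
    (s : String) (hne : ∀ p ∈ segs, pvGoodSeg p) :
    pvBodyA (pvStateOf d segs) s = pvStateOf d (pvSegStep segs s) := by
  rw [pvBodyA_eq_header]
  unfold pvSegStep
  cases hm : pvHeader s with
  | some k =>
    simp only [pvStateOf_append]
    rw [pvFlush_stateOf d segs hne]
  | none =>
    rcases List.eq_nil_or_concat segs with rfl | ⟨init, ⟨k, ts⟩, rfl⟩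
    · rfl
    · rw [List.concat_eq_append] at hne ⊢
      simp only [pvStateOf_append, pvAppendLast_append]

-- main invariant: A's streaming loop, flushed, equals the segment fold applied to the dict
lemma pv_loop_eq (S : List String) (d : PySem.Dict String String)
    (segs : List (String × List String)) (hne : ∀ p ∈ segs, pvGoodSeg p) :
    pvFlush (S.foldl pvBodyA (pvStateOf d segs)).1
        (S.foldl pvBodyA (pvStateOf d segs)).2.1
        (S.foldl pvBodyA (pvStateOf d segs)).2.2 =
      (S.foldl pvSegStep segs).foldl pvAssign d := by
  induction S generalizing segs with
  | nil => exact pvFlush_stateOf d segs hne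
  | cons s rest ih =>
    simp only [List.foldl, pv_step_eq d segs s hne]
    exact ih (pvSegStep segs s) (pvSegStep_preserves segs s hne)

lemma pvSegStep_foldl_good (S : List String) (segs : List (String × List String))
    (hne : ∀ p ∈ segs, pvGoodSeg p) : ∀ p ∈ S.foldl pvSegStep segs, pvGoodSeg p := by
  induction S generalizing segs with
  | nil => exact hne
  | cons s rest ih => exact ih (pvSegStep segs s) (pvSegStep_preserves segs s hne)

-- the segment fold continuing an open block equals appending the body then the remaining blocks
lemma pvSegStep_foldl_concat (S : List String) :
    ∀ (segs : List (String × List String)) (k : String) (ts : List String),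
    S.foldl pvSegStep (segs ++ [(k, ts)]) =
      segs ++ (k, ts ++ S.takeWhile (fun x => (pvHeader x).isNone)) ::
        pvBlocks (S.dropWhile (fun x => (pvHeader x).isNone)) := by
  induction S with
  | nil => intro segs k ts; simp [pvBlocks]
  | cons s S' ih =>
    intro segs k ts
    simp only [List.foldl]
    cases hm : pvHeader s with
    | none =>
      rw [show pvSegStep (segs ++ [(k, ts)]) s = pvAppendLast (segs ++ [(k, ts)]) s from by
        unfold pvSegStep; rw [hm]]
      rw [pvAppendLast_append, ih]
      simp [hm]
    | some k' =>
      rw [show pvSegStep (segs ++ [(k, ts)]) s = (segs ++ [(k, ts)]) ++ [(k', [pvSeed s])] from by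
        unfold pvSegStep; rw [hm]]
      rw [ih]
      rw [show pvBlocks (List.dropWhile (fun x => (pvHeader x).isNone) (s :: S'))
            = pvBlocks (s :: S') from by simp [hm]]
      rw [show pvBlocks (s :: S')
            = (k', pvSeed s :: S'.takeWhile (fun x => (pvHeader x).isNone)) ::
                pvBlocks (S'.dropWhile (fun x => (pvHeader x).isNone)) from by
        rw [pvBlocks]; rw [hm]]
      simp [hm]

lemma pvSegStep_foldl_nil (S : List String) : S.foldl pvSegStep [] = pvBlocks S := by
  induction S with
  | nil => simp [pvBlocks]
  | cons s S' ih =>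
    simp only [List.foldl]
    cases hm : pvHeader s with
    | none =>
      rw [show pvSegStep [] s = [] from by simp [pvSegStep, hm, pvAppendLast]]
      rw [ih, pvBlocks, hm]
    | some k =>
      rw [show pvSegStep [] s = [] ++ [(k, [pvSeed s])] from by simp [pvSegStep, hm]]
      rw [pvSegStep_foldl_concat]
      rw [pvBlocks, hm]
      simp

lemma pvLastV_cons {α : Type} (cls : α → Option String) (val : α → String) (x : α)
    (xs : List α) (k dflt : String) :
    pvLastV cls val (x :: xs) k dflt =
      pvLastV cls val xs k (if cls x == some k then val x else dflt) := rfl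

-- a fold of keyed overwrites on the three-key dict computes the last value per key
lemma pvFoldl_mk3 {α : Type} (cls : α → Option String) (val : α → String) (xs : List α)
    (h : ∀ x ∈ xs, ∀ k, cls x = some k → k = "structure" ∨ k = "content" ∨ k = "translation") :
    ∀ (a b c : String),
    xs.foldl (fun d x => match cls x with | some k => d.insert k (val x) | none => d)
        (pvMk3 a b c) =
      pvMk3 (pvLastV cls val xs "structure" a) (pvLastV cls val xs "content" b)
        (pvLastV cls val xs "translation" c) := by
  induction xs with
  | nil => intro a b c; rfl
  | cons x xs ih =>
    intro a b c
    have ih' := ih (fun y hy => h y (List.mem_cons_of_mem _ hy))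
    simp only [List.foldl, pvLastV_cons]
    cases hc : cls x with
    | none =>
      show List.foldl _ (pvMk3 a b c) xs = _
      rw [ih']; simp
    | some k =>
      rcases h x List.mem_cons_self k hc with rfl | rfl | rfl
      · show List.foldl _ (pvMk3 (val x) b c) xs = _
        rw [ih']; simp
      · show List.foldl _ (pvMk3 a (val x) c) xs = _
        rw [ih']; simp
      · show List.foldl _ (pvMk3 a b (val x)) xs = _
        rw [ih']; simp

lemma pvLastV_eq_find {α : Type} (cls : α → Option String) (val : α → String)
    (xs : List α) (k : String) : ∀ (dflt : String),
    pvLastV cls val xs k dflt =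
      match xs.reverse.find? (fun x => cls x == some k) with
      | some x => val x
      | none => dflt := by
  induction xs with
  | nil => intro dflt; rfl
  | cons x xs ih =>
    intro dflt
    rw [pvLastV_cons, ih]
    rw [List.reverse_cons, List.find?_append]
    cases hf : xs.reverse.find? (fun x => cls x == some k) with
    | some y => simp
    | none =>
      simp only [Option.none_or]
      by_cases hx : (cls x == some k) = true
      · simp [List.find?, hx]
      · simp [List.find?, hx]

-- A's " | " loop body, re-expressed through the part classifier
lemma pvStepBar_eq_match (d : PySem.Dict String String) (part : String) :
    pvStepBar d part =
      match pvClassifyPart part with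
      | some k => d.insert k (pvReasoningPart part)
      | none => d := by
  unfold pvStepBar pvClassifyPart
  split_ifs <;> rfl

lemma pvClassifyPart_cases (part k : String) (h : pvClassifyPart part = some k) :
    k = "structure" ∨ k = "content" ∨ k = "translation" := by
  unfold pvClassifyPart at h
  split_ifs at h <;> simp_all

lemma pvPartValue_eq (parts : List String) (k : String) :
    pvPartValue parts k =
      pvLastV pvClassifyPart pvReasoningPart parts k "No specific reasoning provided" := by
  unfold pvPartValue
  rw [pvLastV_eq_find]
  cases parts.reverse.find? (fun x => pvClassifyPart x == some k) <;> rfl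

lemma pvBlockValue_eq (blocks : List (String × List String)) (k : String) :
    pvBlockValue blocks k =
      pvLastV (fun seg => some seg.1) (fun seg => PySem.Str.join " " seg.2) blocks k
        "No specific reasoning provided" := by
  unfold pvBlockValue
  rw [pvLastV_eq_find]
  rw [show (fun x : String × List String => some x.1 == some k)
        = (fun x : String × List String => x.1 == k) from funext fun x => by simp]
  cases blocks.reverse.find? (fun x : String × List String => x.1 == k) <;> rfl

-- ===== VERDICT (by name: the statement is the Claim_ definition above) =====
theorem parse_ai_reasoning_for_analytics_spec : Claim_equal_parse_ai_reasoning_for_analytics := by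
  intro r _
  unfold Spec_parse_ai_reasoning_for_analytics parse_ai_reasoning_for_analytics
    parse_ai_reasoning_for_analytics_alt
  by_cases hs : PySem.Str.strip r = ""
  · rw [if_pos (Or.inr hs), if_pos hs]
  · have hA : ¬ (r = "" ∨ PySem.Str.strip r = "") := by
      rintro (rfl | h)
      · exact hs (by decide)
      · exact hs h
    rw [if_neg hA, if_neg hs]
    by_cases hb : PySem.Str.isIn " | " r = true
    · simp only [hb, if_true]
      -- " | " branch: the overwrite fold equals, per key, the last matching part
      have hstep : pvStepBar = fun d part =>
          match pvClassifyPart part with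
          | some k => d.insert k (pvReasoningPart part)
          | none => d :=
        funext fun d => funext fun part => pvStepBar_eq_match d part
      rw [hstep]
      rw [show (PySem.Dict.ofList [("structure", "No specific reasoning provided"),
            ("content", "No specific reasoning provided"),
            ("translation", "No specific reasoning provided")]) =
          pvMk3 "No specific reasoning provided" "No specific reasoning provided"
            "No specific reasoning provided" from rfl]
      rw [pvFoldl_mk3 pvClassifyPart pvReasoningPart _
        (fun part _ k hk => pvClassifyPart_cases part k hk)]
      rw [← pvPartValue_eq, ← pvPartValue_eq, ← pvPartValue_eq]
      rfl
    · simp only [hb, if_false, Bool.false_eq_true]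
      by_cases hk : (["structure", "content", "translation"].any
          fun k => PySem.Str.isIn k (PySem.Str.lower r)) = true
      · simp only [hk, if_true]
        -- keyword branch
        set lines := (PySem.Str.split? r "\n").getD [] with hlines
        set S := (lines.map PySem.Str.strip).filter (fun l => l != "") with hS
        have h1 : ∀ (ls : List String)
            (st : PySem.Dict String String × Option String × List String),
            ls.foldl pvStepA st = (ls.map PySem.Str.strip).foldl
              (fun st s => if s = "" then st else pvBodyA st s) st := by
          intro ls
          induction ls with
          | nil => intro st; rfl
          | cons l ls ih =>
            intro st
            simp only [List.map_cons, List.foldl_cons]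
            rw [ih]
            congr 1
        have h2 : (fun (st : PySem.Dict String String × Option String × List String)
              (s : String) => if s = "" then st else pvBodyA st s)
            = (fun st s => if (s != "") = true then pvBodyA st s else st) := by
          funext st s
          by_cases h : s = "" <;> simp [h]
        have hmap : lines.foldl pvStepA
              (pvMk3 "No specific reasoning provided" "No specific reasoning provided"
                "No specific reasoning provided", none, ([] : List String)) =
            S.foldl pvBodyA
              (pvStateOf (pvMk3 "No specific reasoning provided" "No specific reasoning provided"
                "No specific reasoning provided") []) := by
          rw [h1, h2, hS, List.foldl_filter]
          rfl
        rw [show (PySem.Dict.ofList [("structure", "No specific reasoning provided"),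
              ("content", "No specific reasoning provided"),
              ("translation", "No specific reasoning provided")]) =
            pvMk3 "No specific reasoning provided" "No specific reasoning provided"
              "No specific reasoning provided" from rfl]
        rw [hmap, pv_loop_eq S _ [] (by simp), pvSegStep_foldl_nil]
        have hgood : ∀ p ∈ pvBlocks S, pvGoodSeg p := by
          rw [← pvSegStep_foldl_nil]
          exact pvSegStep_foldl_good S [] (by simp)
        have hassign : (pvBlocks S).foldl pvAssign
              (pvMk3 "No specific reasoning provided" "No specific reasoning provided"
                "No specific reasoning provided") =
            pvMk3 (pvLastV (fun seg => some seg.1) (fun seg => PySem.Str.join " " seg.2)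
                (pvBlocks S) "structure" "No specific reasoning provided")
              (pvLastV (fun seg => some seg.1) (fun seg => PySem.Str.join " " seg.2)
                (pvBlocks S) "content" "No specific reasoning provided")
              (pvLastV (fun seg => some seg.1) (fun seg => PySem.Str.join " " seg.2)
                (pvBlocks S) "translation" "No specific reasoning provided") := by
          have hkey : ∀ seg ∈ pvBlocks S, ∀ k : String,
              (some seg.1 : Option String) = some k →
              k = "structure" ∨ k = "content" ∨ k = "translation" := by
            intro seg hseg k hkk
            obtain ⟨hk1, -⟩ := hgood seg hseg
            simp only [Option.some.injEq] at hkk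
            subst hkk
            exact hk1
          exact pvFoldl_mk3 (fun seg => some seg.1) (fun seg => PySem.Str.join " " seg.2)
            (pvBlocks S) hkey _ _ _
        rw [hassign, ← pvBlockValue_eq, ← pvBlockValue_eq, ← pvBlockValue_eq]
        rfl
      · simp only [hk, if_false, Bool.false_eq_true]
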